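-- pv_equiv track=rewrite | github.com/dozine/codetree-TILs | 241124/숫자가 더 큰 인접한 곳으로 이동/move-to-larger-adjacent-cell.py | find_next_position
-- ===== SOURCE A (Python) =====
-- def find_next_position(grid, n, curr_r, curr_c):
--     # 상하좌우 방향 정의 (우선순위 순서대로)
--     dr = [-1, 1, 0, 0]  # 상하좌우
--     dc = [0, 0, -1, 1]
--
--     current_value = grid[curr_r][curr_c]
--     candidates = []  # (값, row, col) 형태로 저장
--
--     # 모든 방향을 확인하고 현재 값보다 큰 값을 가진 위치 저장
--     for i in range(4):
--         new_r = curr_r + dr[i]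
--         new_c = curr_c + dc[i]
--
--         # 격자 범위 내에 있고 현재 값보다 큰 경우
--         if 0 <= new_r < n and 0 <= new_c < n:
--             if grid[new_r][new_c] > current_value:
--                 # (값, 방향 인덱스, row, col) 형태로 저장
--                 candidates.append((grid[new_r][new_c], i, new_r, new_c))
--
--     # 이동할 수 있는 위치가 없는 경우
--     if not candidates:
--         return -1, -1
--
--     # 가능한 위치들 중 우선순위가 가장 높은 위치 선택
--     # 1. 값이 같은 경우 방향 우선순위(상하좌우)를 따름
--     # 2. 값이 다른 경우 더 작은 값을 선택
--     candidates.sort(key=lambda x: (x[0], x[1]))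
--     return candidates[0][2], candidates[0][3]
-- ===== SOURCE B (Python) =====
-- def find_next_position(grid, n, curr_r, curr_c):
--     # Online scan of the four neighbours: keep the best (value, direction) key
--     # seen so far and its position -- no candidate list, no sort.
--     current_value = grid[curr_r][curr_c]
--     best_key = None
--     best_pos = (-1, -1)
--     for i, (dr, dc) in enumerate([(-1, 0), (1, 0), (0, -1), (0, 1)]):
--         r, c = curr_r + dr, curr_c + dc
--         if 0 <= r < n and 0 <= c < n:
--             v = grid[r][c]
--             if v > current_value:
--                 key = (v, i)
--                 if best_key is None or key < best_key:
--                     best_key = key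
--                     best_pos = (r, c)
--     return best_pos
-- ===== Notes on version B (the rewrite author's own statement) =====
-- stated objective: simpler
-- what changed: Replaces collect-all-candidates-then-stable-sort-and-take-first with a single online pass over the four directions that tracks the minimal (value, direction) key and its position.
import Mathlib
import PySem

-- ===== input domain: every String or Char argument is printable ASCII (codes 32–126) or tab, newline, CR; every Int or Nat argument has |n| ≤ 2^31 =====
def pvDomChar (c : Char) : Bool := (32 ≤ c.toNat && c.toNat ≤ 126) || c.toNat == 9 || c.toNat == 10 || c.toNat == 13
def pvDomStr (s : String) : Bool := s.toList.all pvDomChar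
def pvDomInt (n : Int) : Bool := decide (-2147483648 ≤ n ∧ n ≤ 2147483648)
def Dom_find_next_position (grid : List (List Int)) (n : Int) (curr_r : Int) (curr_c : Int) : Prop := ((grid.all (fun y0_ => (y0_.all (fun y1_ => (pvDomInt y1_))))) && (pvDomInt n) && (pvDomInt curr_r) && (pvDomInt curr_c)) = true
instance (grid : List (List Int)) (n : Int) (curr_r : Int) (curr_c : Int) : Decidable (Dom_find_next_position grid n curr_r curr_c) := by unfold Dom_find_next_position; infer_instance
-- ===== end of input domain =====

-- B replaces A's collect-candidates, stable-sort-by-(value, direction), take-first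
-- strategy by a single online pass that tracks the minimal (value, direction) key
-- and its position; same return value, no candidate list and no sort.

-- ===== PORT A =====
-- literal transliteration of A: build the candidate list over range(4), sort by (value, i), take the first
def find_next_position (grid : List (List Int)) (n : Int) (curr_r : Int) (curr_c : Int) : Int × Int :=
  let dr : List Int := [-1, 1, 0, 0]
  let dc : List Int := [0, 0, -1, 1]
  let current_value := PySem.List.pyGetD (PySem.List.pyGetD grid curr_r []) curr_c 0
  let candidates : List (Int × Int × Int × Int) :=
    (PySem.List.pyRange 0 4 1).foldl (fun acc i =>
      let new_r := curr_r + PySem.List.pyGetD dr i 0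
      let new_c := curr_c + PySem.List.pyGetD dc i 0
      if 0 ≤ new_r ∧ new_r < n ∧ 0 ≤ new_c ∧ new_c < n then
        if PySem.List.pyGetD (PySem.List.pyGetD grid new_r []) new_c 0 > current_value then
          acc ++ [(PySem.List.pyGetD (PySem.List.pyGetD grid new_r []) new_c 0, i, new_r, new_c)]
        else acc
      else acc) []
  if candidates = [] then (-1, -1)
  else
    match PySem.List.sorted2 candidates (fun x => x.1) (fun x => x.2.1) with
    | [] => (-1, -1)   -- unreachable: sorted2 of a nonempty list is nonempty
    | c :: _ => (c.2.2.1, c.2.2.2)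

-- ===== PORT B =====
-- literal transliteration of B: one pass over the enumerated directions, tracking the best key and its position
def find_next_position_alt (grid : List (List Int)) (n : Int) (curr_r : Int) (curr_c : Int) : Int × Int :=
  let current_value := PySem.List.pyGetD (PySem.List.pyGetD grid curr_r []) curr_c 0
  let st := (PySem.List.enumerate [((-1 : Int), (0 : Int)), (1, 0), (0, -1), (0, 1)]).foldl
    (fun (st : Option (Int × Int) × (Int × Int)) p =>
      let i : Int := p.1
      let r := curr_r + p.2.1
      let c := curr_c + p.2.2
      if 0 ≤ r ∧ r < n ∧ 0 ≤ c ∧ c < n then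
        let v := PySem.List.pyGetD (PySem.List.pyGetD grid r []) c 0
        if v > current_value then
          match st.1 with
          | none => (some (v, i), (r, c))
          | some bk => if v < bk.1 ∨ (v = bk.1 ∧ i < bk.2) then (some (v, i), (r, c)) else st
        else st
      else st) (none, (-1, -1))
  st.2

-- ===== PRECONDITION & SPEC =====
-- Pre_ excludes exactly the inputs on which Python A raises an IndexError:
-- the current cell's own lookup fails, or a neighbour inside the 0..n-1 range lies outside the actual grid.
def Pre_find_next_position (grid : List (List Int)) (n : Int) (curr_r : Int) (curr_c : Int) : Prop :=
  ((PySem.List.pyGet? grid curr_r).bind (fun row => PySem.List.pyGet? row curr_c)).isSome = true ∧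
  ∀ d ∈ [((-1 : Int), (0 : Int)), (1, 0), (0, -1), (0, 1)],
    (0 ≤ curr_r + d.1 ∧ curr_r + d.1 < n ∧ 0 ≤ curr_c + d.2 ∧ curr_c + d.2 < n) →
    ((PySem.List.pyGet? grid (curr_r + d.1)).bind (fun row => PySem.List.pyGet? row (curr_c + d.2))).isSome = true
instance (grid : List (List Int)) (n : Int) (curr_r : Int) (curr_c : Int) : Decidable (Pre_find_next_position grid n curr_r curr_c) := by unfold Pre_find_next_position; infer_instance

def pvWitness_find_next_position : List (List Int) × Int × Int × Int := ([[1, 2], [3, 4]], 2, 0, 0)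

def Spec_find_next_position (grid : List (List Int)) (n : Int) (curr_r : Int) (curr_c : Int) (out : Int × Int) : Prop := out = find_next_position_alt grid n curr_r curr_c
instance (grid : List (List Int)) (n : Int) (curr_r : Int) (curr_c : Int) (out : Int × Int) : Decidable (Spec_find_next_position grid n curr_r curr_c out) := by unfold Spec_find_next_position; infer_instance

-- ===== CLAIM (what is proved, stated in full; the proofs are below) =====
def Claim_equal_find_next_position : Prop := ∀ (grid : List (List Int)) (n : Int) (curr_r : Int) (curr_c : Int), Dom_find_next_position grid n curr_r curr_c → Pre_find_next_position grid n curr_r curr_c → Spec_find_next_position grid n curr_r curr_c (find_next_position grid n curr_r curr_c)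

-- ===== LEMMAS AND PROOFS =====

-- element: (value, i, r, c)
def pvBlt (a b : Int × Int × Int × Int) : Bool :=
  decide (a.1 < b.1) || !decide (b.1 < a.1) && decide (a.2.1 < b.2.1)

def pvUpd (st : Option (Int × Int) × (Int × Int)) (e : Int × Int × Int × Int) :
    Option (Int × Int) × (Int × Int) :=
  match st.1 with
  | none => (some (e.1, e.2.1), (e.2.2.1, e.2.2.2))
  | some bk => if e.1 < bk.1 ∨ (e.1 = bk.1 ∧ e.2.1 < bk.2) then (some (e.1, e.2.1), (e.2.2.1, e.2.2.2)) else st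

theorem pvStep (st : Option (Int × Int) × (Int × Int)) (G L : Prop) [Decidable G] [Decidable L]
    (e : Int × Int × Int × Int) :
    List.foldl pvUpd st (if G then (if L then [e] else []) else []) =
      (if G then (if L then pvUpd st e else st) else st) := by
  split_ifs <;> rfl

def pvMh : List (Int × Int × Int × Int) → Prop
  | [] => True
  | h :: t => ∀ z ∈ h :: t, pvBlt z h = false

theorem pvBlt_trans {a b c} (h1 : pvBlt a b = true) (h2 : pvBlt b c = true) : pvBlt a c = true := by
  simp [pvBlt] at *; omega

theorem pvBlt_irrefl (a) : pvBlt a a = false := by simp [pvBlt]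

theorem pvMh_insertBy (x : Int × Int × Int × Int) (ys : List (Int × Int × Int × Int))
    (h : pvMh ys) : pvMh (PySem.List.insertBy pvBlt x ys) := by
  cases ys with
  | nil => simp [PySem.List.insertBy, pvMh, pvBlt_irrefl]
  | cons y t =>
    rw [PySem.List.insertBy]
    by_cases hxy : pvBlt x y = true
    · simp only [hxy, if_true]
      intro z hz
      rcases List.mem_cons.1 hz with rfl | hz
      · exact pvBlt_irrefl z
      · -- z ∈ y :: t, pvBlt z y = false by h; if pvBlt z x then pvBlt z y — contra
        by_contra hzx
        have hzy := h z hz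
        have : pvBlt z y = true := pvBlt_trans (by simpa using hzx) hxy
        simp [hzy] at this
    · simp only [hxy]
      intro z hz
      rcases List.mem_cons.1 hz with rfl | hz
      · exact h _ (by simp)
      · rcases (PySem.List.mem_insertBy pvBlt x z t).1 hz with rfl | hzt
        · simpa using hxy
        · exact h z (by simp [hzt])

theorem pvMh_foldl (xs acc : List (Int × Int × Int × Int)) (h : pvMh acc) :
    pvMh (xs.foldl (fun acc x => PySem.List.insertBy pvBlt x acc) acc) := by
  induction xs generalizing acc with
  | nil => exact h
  | cons x xs ih => exact ih _ (pvMh_insertBy x acc h)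

-- first-minimum: from any seeded state b, if m is the unique minimum of b :: xs, the fold ends at m
theorem pvFold_min (xs : List (Int × Int × Int × Int)) (b m : Int × Int × Int × Int)
    (hm : m ∈ b :: xs) (hmin : ∀ z ∈ b :: xs, pvBlt z m = false)
    (hne : (b :: xs).Pairwise (fun a c => a.2.1 ≠ c.2.1)) :
    xs.foldl pvUpd (some (b.1, b.2.1), (b.2.2.1, b.2.2.2)) = (some (m.1, m.2.1), (m.2.2.1, m.2.2.2)) := by
  induction xs generalizing b with
  | nil =>
    rcases List.mem_cons.1 hm with rfl | hm
    · rfl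
    · simp at hm
  | cons x xs ih =>
    simp only [List.foldl, pvUpd]
    by_cases hc : x.1 < b.1 ∨ (x.1 = b.1 ∧ x.2.1 < b.2.1)
    · simp only [hc, if_true]
      -- new seed x; m ∈ x :: xs
      have hbx : pvBlt x b = true := by simp [pvBlt]; omega
      have hm' : m ∈ x :: xs := by
        rcases List.mem_cons.1 hm with rfl | hm
        · -- m = b : but pvBlt x b true contradicts minimality of b
          exact absurd (hmin x (by simp)) (by simp [hbx])
        · exact hm
      exact ih x hm' (fun z hz => hmin z (by
          rcases List.mem_cons.1 hz with rfl | hz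
          · simp
          · simp [hz]))
        ((List.pairwise_cons.1 hne).2)
    · simp only [hc, if_false]
      -- seed stays b; m ∈ b :: xs still, but m ≠ x unless keys equal
      have hm' : m ∈ b :: xs := by
        rcases List.mem_cons.1 hm with rfl | hm
        · simp
        · rcases List.mem_cons.1 hm with rfl | hm
          · -- m = x: minimality gives pvBlt b x = false, i.e. key x ≤ key b; hc gives key b ≤ key x; keys distinct
            exfalso
            have h1 := hmin b (by simp)
            have hne' : b.2.1 ≠ m.2.1 := by
              have := List.pairwise_cons.1 hne
              exact this.1 m (by simp)
            simp [pvBlt] at h1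
            omega
          · simp [hm]
      exact ih b hm' (fun z hz => hmin z (by
          rcases List.mem_cons.1 hz with rfl | hz
          · simp
          · simp [hz]))
        (by
          rcases List.pairwise_cons.1 hne with ⟨hb, hxs⟩
          rcases List.pairwise_cons.1 hxs with ⟨hx, hxs'⟩
          exact List.pairwise_cons.2 ⟨fun z hz => hb z (by simp [hz]), hxs'⟩)

def pvTail (L : List (Int × Int × Int × Int)) : Int × Int :=
  if L = [] then (-1, -1)
  else
    match PySem.List.sorted2 L (fun x => x.1) (fun x => x.2.1) with
    | [] => (-1, -1)
    | c :: _ => (c.2.2.1, c.2.2.2)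

theorem pvCore (L : List (Int × Int × Int × Int))
    (hpw : L.Pairwise (fun a c => a.2.1 ≠ c.2.1)) :
    pvTail L = (L.foldl pvUpd (none, (-1, -1))).2 := by
  unfold pvTail
  cases L with
  | nil => rfl
  | cons l0 ls =>
    have hsort : PySem.List.sorted2 (l0 :: ls) (fun x => x.1) (fun x => x.2.1)
        = (l0 :: ls).foldl (fun acc x => PySem.List.insertBy pvBlt x acc) [] := rfl
    have hperm : (PySem.List.sorted2 (l0 :: ls) (fun x => x.1) (fun x => x.2.1)).Perm (l0 :: ls) := by
      rw [hsort]
      simpa using PySem.List.foldl_insertBy_perm pvBlt (l0 :: ls) []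
    have hmh : pvMh (PySem.List.sorted2 (l0 :: ls) (fun x => x.1) (fun x => x.2.1)) := by
      rw [hsort]; exact pvMh_foldl _ _ trivial
    have hne : (l0 :: ls) ≠ [] := by simp
    rw [if_neg hne]
    cases hs : PySem.List.sorted2 (l0 :: ls) (fun x => x.1) (fun x => x.2.1) with
    | nil => exact absurd (hperm.length_eq) (by rw [hs]; simp)
    | cons c t =>
      rw [hs] at hperm hmh
      have hcmem : c ∈ l0 :: ls := hperm.mem_iff.1 (by simp)
      have hmin : ∀ z ∈ l0 :: ls, pvBlt z c = false :=
        fun z hz => hmh z (hperm.mem_iff.2 hz)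
      have : (l0 :: ls).foldl pvUpd (none, (-1, -1))
          = (some (c.1, c.2.1), (c.2.2.1, c.2.2.2)) := by
        show ls.foldl pvUpd (pvUpd (none, (-1, -1)) l0) = _
        have h0 : pvUpd (none, (-1, -1)) l0 = (some (l0.1, l0.2.1), (l0.2.2.1, l0.2.2.2)) := rfl
        rw [h0]
        exact pvFold_min ls l0 c hcmem hmin (by
          exact hpw.imp (fun h => h) |>.sublist (List.Sublist.refl _))
      rw [this]

set_option maxHeartbeats 4000000 in
theorem find_next_position_spec : Claim_equal_find_next_position := by
  intro grid n curr_r curr_c _ _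
  unfold Spec_find_next_position find_next_position find_next_position_alt
  simp only [show PySem.List.pyRange 0 4 1 = [0, 1, 2, 3] from rfl,
    show PySem.List.enumerate [((-1 : Int), (0 : Int)), (1, 0), (0, -1), (0, 1)]
      = [((0 : Int), ((-1 : Int), (0 : Int))), (1, (1, 0)), (2, (0, -1)), (3, (0, 1))] from rfl,
    List.foldl_cons, List.foldl_nil,
    show PySem.List.pyGetD [(-1 : Int), 1, 0, 0] (0 : Int) 0 = -1 from rfl,
    show PySem.List.pyGetD [(-1 : Int), 1, 0, 0] (1 : Int) 0 = 1 from rfl,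
    show PySem.List.pyGetD [(-1 : Int), 1, 0, 0] (2 : Int) 0 = 0 from rfl,
    show PySem.List.pyGetD [(-1 : Int), 1, 0, 0] (3 : Int) 0 = 0 from rfl,
    show PySem.List.pyGetD [(0 : Int), 0, -1, 1] (0 : Int) 0 = 0 from rfl,
    show PySem.List.pyGetD [(0 : Int), 0, -1, 1] (1 : Int) 0 = 0 from rfl,
    show PySem.List.pyGetD [(0 : Int), 0, -1, 1] (2 : Int) 0 = -1 from rfl,
    show PySem.List.pyGetD [(0 : Int), 0, -1, 1] (3 : Int) 0 = 1 from rfl,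
    gt_iff_lt]
  have hpw : ((if 0 ≤ curr_r + -1 ∧ curr_r + -1 < n ∧ 0 ≤ curr_c + 0 ∧ curr_c + 0 < n then (if PySem.List.pyGetD (PySem.List.pyGetD grid curr_r []) curr_c 0 < PySem.List.pyGetD (PySem.List.pyGetD grid (curr_r + -1) []) (curr_c + 0) 0 then [(PySem.List.pyGetD (PySem.List.pyGetD grid (curr_r + -1) []) (curr_c + 0) 0, 0, curr_r + -1, curr_c + 0)] else []) else ([] : List (Int × Int × Int × Int))) ++ (if 0 ≤ curr_r + 1 ∧ curr_r + 1 < n ∧ 0 ≤ curr_c + 0 ∧ curr_c + 0 < n then (if PySem.List.pyGetD (PySem.List.pyGetD grid curr_r []) curr_c 0 < PySem.List.pyGetD (PySem.List.pyGetD grid (curr_r + 1) []) (curr_c + 0) 0 then [(PySem.List.pyGetD (PySem.List.pyGetD grid (curr_r + 1) []) (curr_c + 0) 0, 1, curr_r + 1, curr_c + 0)] else []) else ([] : List (Int × Int × Int × Int))) ++ (if 0 ≤ curr_r + 0 ∧ curr_r + 0 < n ∧ 0 ≤ curr_c + -1 ∧ curr_c + -1 < n then (if PySem.List.pyGetD (PySem.List.pyGetD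 grid curr_r []) curr_c 0 < PySem.List.pyGetD (PySem.List.pyGetD grid (curr_r + 0) []) (curr_c + -1) 0 then [(PySem.List.pyGetD (PySem.List.pyGetD grid (curr_r + 0) []) (curr_c + -1) 0, 2, curr_r + 0, curr_c + -1)] else []) else ([] : List (Int × Int × Int × Int))) ++ (if 0 ≤ curr_r + 0 ∧ curr_r + 0 < n ∧ 0 ≤ curr_c + 1 ∧ curr_c + 1 < n then (if PySem.List.pyGetD (PySem.List.pyGetD grid curr_r []) curr_c 0 < PySem.List.pyGetD (PySem.List.pyGetD grid (curr_r + 0) []) (curr_c + 1) 0 then [(PySem.List.pyGetD (PySem.List.pyGetD grid (curr_r + 0) []) (curr_c + 1) 0, 3, curr_r + 0, curr_c + 1)] else []) else ([] : List (Int × Int × Int × Int)))).Pairwise (fun a c => a.2.1 ≠ c.2.1) := by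
    split_ifs <;> simp
  have hcore := pvCore _ hpw
  refine Eq.trans (congrArg pvTail ?_) (Eq.trans hcore ?_)
  · split_ifs <;> simp
  · simp only [List.foldl_append, pvStep]
    rfl
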